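-- pv_equiv track=rewrite | github.com/Muthres-1/DSA_A_TO_Z | Bit Manipulation/basic problems/convertToDecimal.py | DecimalOfBinary
-- ===== SOURCE A (Python) =====
-- def DecimalOfBinary(strr):
--     sum=0
--     n=len(strr)
--     if strr[0]=='1':
--         k=0
--     else:k=-1
--     power=1
--     for i in range(n-1,k,-1):
--         if strr[i]=='1':
--             sum+=power
--         power*=2
--     if k==0:sum=-sum
--     return sum
-- ===== SOURCE B (Python) =====
-- def DecimalOfBinary(strr):
--     negative = strr[0] == '1'
--     acc = 0
--     for c in strr[1:]:
--         acc = 2 * acc + (1 if c == '1' else 0)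
--     return -acc if negative else acc
-- ===== Notes on version B (the rewrite author's own statement) =====
-- stated objective: alternative
-- what changed: Replaced the reverse index loop that maintains a separate ever-growing power-of-two accumulator (power *= 2) with a forward left-to-right Horner fold over the tail slice (acc = 2*acc + bit), reading the sign bit once up front.
import Mathlib
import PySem

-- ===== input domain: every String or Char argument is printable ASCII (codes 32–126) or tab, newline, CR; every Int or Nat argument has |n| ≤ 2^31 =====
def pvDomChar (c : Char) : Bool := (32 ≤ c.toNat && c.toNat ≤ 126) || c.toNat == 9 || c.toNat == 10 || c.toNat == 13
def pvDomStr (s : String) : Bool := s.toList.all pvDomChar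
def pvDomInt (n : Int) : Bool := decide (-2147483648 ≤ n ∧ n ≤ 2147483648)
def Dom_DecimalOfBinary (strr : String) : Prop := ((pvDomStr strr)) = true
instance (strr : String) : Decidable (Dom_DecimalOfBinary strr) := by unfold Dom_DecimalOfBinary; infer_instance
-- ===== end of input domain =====

-- B replaces A's reverse index loop with an explicit power accumulator by a forward Horner fold
-- over the tail, reading the sign bit once; alternative decomposition, same O(n) cost.

-- ===== PORT A =====
def DecimalOfBinary (strr : String) : Int :=
  let cs := strr.toList
  let n : Int := cs.length
  let k : Int := if PySem.List.pyGet? cs 0 = some '1' then 0 else -1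
  let res := (PySem.List.pyRange (n - 1) k (-1)).foldl
    (fun (st : Int × Int) i =>
      (if PySem.List.pyGet? cs i = some '1' then st.1 + st.2 else st.1, st.2 * 2))
    (0, 1)
  if k = 0 then -res.1 else res.1

-- ===== PORT B =====
-- acc = 2*acc + (1 if c == '1' else 0)
def hornerStep (acc : Int) (c : Char) : Int := 2 * acc + (if c = '1' then 1 else 0)

def DecimalOfBinary_alt (strr : String) : Int :=
  let cs := strr.toList
  let negative := PySem.List.pyGet? cs 0 = some '1'
  let acc := (PySem.List.slice cs (some 1) none).foldl hornerStep 0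
  if negative then -acc else acc

-- ===== PRECONDITION & SPEC =====
-- Pre_ excludes only the empty string, on which Python A raises IndexError at strr[0].
def Pre_DecimalOfBinary (strr : String) : Prop := strr ≠ ""
instance (strr : String) : Decidable (Pre_DecimalOfBinary strr) := by
  unfold Pre_DecimalOfBinary; infer_instance

def pvWitness_DecimalOfBinary : String := "1011"

def Spec_DecimalOfBinary (strr : String) (out : Int) : Prop := out = DecimalOfBinary_alt strr
instance (strr : String) (out : Int) : Decidable (Spec_DecimalOfBinary strr out) := by
  unfold Spec_DecimalOfBinary; infer_instance

-- ===== CLAIM (what is proved, stated in full; the proofs are below) =====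
def Claim_equal_DecimalOfBinary : Prop := ∀ (strr : String), Dom_DecimalOfBinary strr →
  Pre_DecimalOfBinary strr → Spec_DecimalOfBinary strr (DecimalOfBinary strr)

-- ===== LEMMAS AND PROOFS =====

-- A's loop body, with the character already looked up.
def stepC (st : Int × Int) (c : Char) : Int × Int :=
  (if c = '1' then st.1 + st.2 else st.1, st.2 * 2)

-- Horner with any start value shifts by a power of two.
theorem horner_shift (l : List Char) : ∀ a : Int,
    l.foldl hornerStep a = a * 2 ^ l.length + l.foldl hornerStep 0 := by
  induction l with
  | nil => intro a; simp
  | cons c t ih =>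
    intro a
    simp only [List.foldl_cons, List.length_cons]
    rw [ih (hornerStep a c), ih (hornerStep 0 c)]
    simp only [hornerStep]
    ring

-- Folding A's step over the reversed list is Horner on the list.
theorem revfold (l : List Char) : ∀ s p : Int,
    l.reverse.foldl stepC (s, p) = (s + p * l.foldl hornerStep 0, p * 2 ^ l.length) := by
  induction l with
  | nil => intro s p; simp
  | cons c t ih =>
    intro s p
    simp only [List.reverse_cons, List.foldl_append, ih, List.length_cons,
      List.foldl]
    rw [horner_shift t (hornerStep 0 c)]
    by_cases hc : c = '1'
    · simp [stepC, hornerStep, hc, Prod.ext_iff]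
      constructor <;> ring
    · simp [stepC, hornerStep, hc, Prod.ext_iff]
      ring

-- A's index fold equals Horner on the dropped suffix.
theorem foldA (cs : List Char) (k : Int) (hk : k = 0 ∨ k = -1) :
    (PySem.List.pyRange ((cs.length : Int) - 1) k (-1)).foldl
      (fun (st : Int × Int) i =>
        (if PySem.List.pyGet? cs i = some '1' then st.1 + st.2 else st.1, st.2 * 2))
      (0, 1)
    = ((cs.drop (k + 1).toNat).foldl hornerStep 0,
       2 ^ (cs.drop (k + 1).toNat).length) := by
  have hcg : (PySem.List.pyRange ((cs.length : Int) - 1) k (-1)).foldl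
      (fun (st : Int × Int) i =>
        (if PySem.List.pyGet? cs i = some '1' then st.1 + st.2 else st.1, st.2 * 2)) (0, 1)
      = (PySem.List.pyRange ((cs.length : Int) - 1) k (-1)).foldl
        (fun (st : Int × Int) i => stepC st (PySem.List.pyGetD cs i ' ')) (0, 1) := by
    apply PySem.List.foldl_congr_mem
    intro st i hi
    rw [PySem.List.mem_pyRange_neg_one] at hi
    have h0 : 0 ≤ i := by rcases hk with h | h <;> omega
    have hlt : i < (cs.length : Int) := by omega
    rw [PySem.List.pyGet?_eq_some_getElem cs h0 hlt,
        PySem.List.pyGetD_eq_getElem cs ' ' h0 hlt]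
    simp [stepC]
  rw [hcg, PySem.List.pyRange_neg_one_eq_reverse]
  have hb : (cs.length : Int) - 1 + 1 = (cs.length : Int) := by ring
  rw [hb, ← List.foldl_map (f := fun i => PySem.List.pyGetD cs i ' ') (g := stepC),
      List.map_reverse,
      PySem.List.map_pyGetD_pyRange' cs ' ' (a := k + 1) (by rcases hk with h | h <;> omega),
      revfold]
  simp

-- ===== VERDICT (by name: the statement is the Claim_ definition above) =====
theorem DecimalOfBinary_spec : Claim_equal_DecimalOfBinary := by
  intro strr _ hpre
  unfold Spec_DecimalOfBinary DecimalOfBinary DecimalOfBinary_alt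
  have hne : strr.toList ≠ [] := by
    simp only [ne_eq, String.toList_eq_nil_iff]
    exact hpre
  obtain ⟨c, t, hcs⟩ : ∃ c t, strr.toList = c :: t := by
    cases h : strr.toList with
    | nil => exact absurd h hne
    | cons c t => exact ⟨c, t, rfl⟩
  simp only [hcs, PySem.List.pyGet?_zero_cons, PySem.List.slice_from_one, List.tail_cons]
  by_cases hc : c = '1'
  · subst hc
    have hk := foldA ('1' :: t) 0 (Or.inl rfl)
    simp only [List.length_cons, Nat.cast_add, Nat.cast_one, add_sub_cancel_right,
      zero_add] at hk
    norm_num at hk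
    simp [hk]
  · have hk := foldA (c :: t) (-1) (Or.inr rfl)
    simp only [List.length_cons, Nat.cast_add, Nat.cast_one, add_sub_cancel_right] at hk
    norm_num at hk
    simp [hc, hk, hornerStep]
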